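-- pv_equiv track=rewrite | github.com/Gen1us02/PPOIS | Set/utils.py | convert_to_list
-- ===== SOURCE A (Python) =====
-- from typing import List
--
-- def remove_duplicates(collection: List[str]) -> List[str]:
--     """Функция используется для удаления повторяющихся элементов
--
--     Аргументы:
--         collection (List[str]): Список элементов множества
--
--     Возвращаемое значение:
--         List[str]: Множество входящих элементов
--     """
--     seen = []
--     for elem in collection:
--         if elem not in seen:
--             seen.append(elem)
--
--     return seen
--
-- def convert_to_list(string: str) -> List[str]:
--     """Функция переводит строковое представление множества в список элементов этого множества
--
--     Аргументы:
--         string (str): Строковое представление множества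
--
--     Возвращаемое значение:
--         List[str]: Список, содержащий элементы множества
--     """
--     string = string.strip(" \n")[1:-1].replace(" ", "")
--     stack = []
--     curr = ""
--     breckets_count = 0
--
--     for char in string:
--         if char == "{":
--             breckets_count += 1
--         elif char == "}":
--             breckets_count -= 1
--
--         if char == "," and breckets_count == 0:
--             if curr:
--                 stack.append(curr)
--
--             curr = ""
--         else:
--             curr += char
--
--     if curr:
--         stack.append(curr)
--
--     return remove_duplicates(stack)
-- ===== SOURCE B (Python) =====
-- def convert_to_list(string):
--     inner = string.strip(" \n")[1:-1].replace(" ", "")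
--     tokens = []
--     buf = None
--     balance = 0
--     for frag in inner.split(","):
--         balance += frag.count("{") - frag.count("}")
--         buf = frag if buf is None else buf + "," + frag
--         if balance == 0:
--             if buf:
--                 tokens.append(buf)
--             buf = None
--     if buf:
--         tokens.append(buf)
--     return list(dict.fromkeys(tokens))
-- ===== Notes on version B (the rewrite author's own statement) =====
-- stated objective: alternative
-- what changed: A scans the inner string character by character with a running brace counter and a growing curr buffer; B instead splits the inner string on every comma and folds over the fragments, rejoining consecutive fragments with ',' while the brace balance is non-zero and flushing whenever it returns to zero, then dedups via dict.fromkeys.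
import Mathlib
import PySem

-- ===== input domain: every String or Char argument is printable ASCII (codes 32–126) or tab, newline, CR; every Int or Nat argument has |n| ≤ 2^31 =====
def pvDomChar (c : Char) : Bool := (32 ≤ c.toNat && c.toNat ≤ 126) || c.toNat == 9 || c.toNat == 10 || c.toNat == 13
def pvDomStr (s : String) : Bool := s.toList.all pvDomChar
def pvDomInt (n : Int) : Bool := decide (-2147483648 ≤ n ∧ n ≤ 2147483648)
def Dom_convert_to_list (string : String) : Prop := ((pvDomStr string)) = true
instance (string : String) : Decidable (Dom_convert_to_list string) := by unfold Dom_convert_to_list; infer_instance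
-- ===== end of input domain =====

-- B re-decomposes the char-by-char scan as comma-splitting with balance-driven rejoin (objective: alternative, same cost).

-- ===== PORT A =====
-- shared preprocessing line of both Pythons: string.strip(" \n")[1:-1].replace(" ", "")
def convertPre (string : String) : List Char :=
  PySem.Chars.replace
    (PySem.List.slice (PySem.Chars.stripChars string.toList [' ', '\n']) (some 1) (some (-1)))
    [' '] []

def remove_duplicates (collection : List String) : List String :=
  collection.foldl (fun seen elem => if seen.contains elem then seen else seen ++ [elem]) []

-- one iteration of A's 'for char in string' loop; state = (stack, curr, breckets_count)
def convertStepA (st : List (List Char) × List Char × Int) (char : Char) :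
    List (List Char) × List Char × Int :=
  let bc := if char = '{' then st.2.2 + 1 else if char = '}' then st.2.2 - 1 else st.2.2
  if char = ',' ∧ bc = 0 then
    (if st.2.1 ≠ [] then st.1 ++ [st.2.1] else st.1, ([] : List Char), bc)
  else
    (st.1, st.2.1 ++ [char], bc)

def convert_to_list (string : String) : List String :=
  let fin := List.foldl convertStepA ([], [], 0) (convertPre string)
  let stack := if fin.2.1 ≠ [] then fin.1 ++ [fin.2.1] else fin.1
  remove_duplicates (stack.map String.ofList)

-- ===== PORT B =====
-- one iteration of B's 'for frag in inner.split(",")' loop; state = (tokens, buf, balance)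
def convertStepB (st : List (List Char) × Option (List Char) × Int) (frag : List Char) :
    List (List Char) × Option (List Char) × Int :=
  let bal := st.2.2 + (PySem.Chars.count frag ['{'] : Int) - (PySem.Chars.count frag ['}'] : Int)
  let buf := match st.2.1 with
    | none => frag
    | some b => b ++ ',' :: frag
  if bal = 0 then
    (if buf ≠ [] then st.1 ++ [buf] else st.1, none, bal)
  else
    (st.1, some buf, bal)

def convert_to_list_alt (string : String) : List String :=
  let fin := List.foldl convertStepB ([], none, 0) (PySem.Chars.splitOn (convertPre string) [','])
  let tokens := match fin.2.1 with
    | none => fin.1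
    | some b => if b ≠ [] then fin.1 ++ [b] else fin.1
  PySem.List.dedup (tokens.map String.ofList)

-- ===== PRECONDITION & SPEC =====
def Spec_convert_to_list (string : String) (out : List String) : Prop := out = convert_to_list_alt string
instance (string : String) (out : List String) : Decidable (Spec_convert_to_list string out) := by unfold Spec_convert_to_list; infer_instance

-- ===== CLAIM (what is proved, stated in full; the proofs are below) =====
def Claim_equal_convert_to_list : Prop := ∀ (string : String), Dom_convert_to_list string → Spec_convert_to_list string (convert_to_list string)

-- ===== LEMMAS AND PROOFS =====

-- remove_duplicates is exactly the ordered dedup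
theorem rd_eq_dedup (xs : List String) : remove_duplicates xs = PySem.List.dedup xs := rfl

-- counting a single character
theorem count_go_single (c : Char) :
    ∀ (fuel : Nat) (l : List Char) (acc : Nat), l.length ≤ fuel →
      PySem.Chars.count.go [c] fuel l acc = acc + l.count c := by
  intro fuel
  induction fuel with
  | zero =>
    intro l acc h
    cases l with
    | nil => simp [PySem.Chars.count.go]
    | cons a t => simp at h
  | succ n ih =>
    intro l acc h
    have hlen : ∀ (t : List Char) (a : Char), (a :: t).length ≤ n + 1 → t.length ≤ n := by
      intro t a ht
      simp only [List.length_cons] at ht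
      omega
    cases l with
    | nil => simp [PySem.Chars.count.go]
    | cons a t =>
      rw [PySem.Chars.count.go]
      by_cases hac : c = a
      · subst hac
        rw [if_pos (by simp)]
        have hd : List.drop [c].length (c :: t) = t := rfl
        rw [hd, ih t (acc + 1) (hlen t c h)]
        have : List.count c (c :: t) = List.count c t + 1 := by
          simp
        omega
      · have hpre : List.isPrefixOf [c] (a :: t) = false := by
          simp [List.isPrefixOf, hac]
        rw [hpre]
        simp only [Bool.false_eq_true, if_false]
        rw [ih t acc (hlen t a h)]
        have : List.count c (a :: t) = List.count c t := by
          simp [Ne.symm hac]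
        omega

theorem count_single (f : List Char) (c : Char) :
    PySem.Chars.count f [c] = f.count c := by
  unfold PySem.Chars.count
  simp [count_go_single c f.length f 0 le_rfl]

-- reference single-character split (what Python's inner.split(",") computes)
def split1 : List Char → List (List Char)
  | [] => [[]]
  | c :: rest =>
    if c = ',' then [] :: split1 rest
    else
      match split1 rest with
      | [] => [[c]]
      | p :: ps => (c :: p) :: ps

theorem split1_ne_nil (l : List Char) : split1 l ≠ [] := by
  induction l with
  | nil => simp [split1]
  | cons c rest ih =>
    unfold split1
    split_ifs
    · simp
    · cases h : split1 rest with
      | nil => simp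
      | cons p ps => simp

theorem split1_cons (l : List Char) : ∃ f rest, split1 l = f :: rest := by
  cases h : split1 l with
  | nil => exact absurd h (split1_ne_nil l)
  | cons f rest => exact ⟨f, rest, rfl⟩

theorem splitOn_go_eq :
    ∀ (fuel : Nat) (l cur : List Char) (acc : List (List Char)), l.length < fuel →
      PySem.Chars.splitOn.go [','] fuel l cur acc
        = acc.reverse ++ (split1 l).modifyHead (fun p => cur.reverse ++ p) := by
  intro fuel
  induction fuel with
  | zero => intro l cur acc h; omega
  | succ n ih =>
    intro l cur acc h
    cases l with
    | nil => simp [PySem.Chars.splitOn.go, split1]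
    | cons c rest =>
      have hrest : rest.length < n := by
        simp only [List.length_cons] at h
        omega
      rw [PySem.Chars.splitOn.go]
      by_cases hc : c = ','
      · subst hc
        rw [if_pos (by simp [List.isPrefixOf])]
        have hd : List.drop [','].length (',' :: rest) = rest := rfl
        rw [hd, ih rest [] (cur.reverse :: acc) hrest]
        obtain ⟨p, ps, hs⟩ := split1_cons rest
        simp [split1, hs]
      · have hpre : List.isPrefixOf [','] (c :: rest) = false := by
          simp [List.isPrefixOf]
          intro hcc
          exact absurd hcc.symm hc
        rw [hpre]
        simp only [Bool.false_eq_true, if_false]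
        rw [ih rest (c :: cur) acc hrest]
        obtain ⟨p, ps, hs⟩ := split1_cons rest
        simp [split1, hc, hs]

theorem splitOn_comma (l : List Char) : PySem.Chars.splitOn l [','] = split1 l := by
  unfold PySem.Chars.splitOn
  rw [splitOn_go_eq (l.length + 1) l [] [] (by omega)]
  obtain ⟨p, ps, hs⟩ := split1_cons l
  simp [hs]

theorem split1_no_comma : ∀ (l : List Char), ∀ p ∈ split1 l, ',' ∉ p := by
  intro l
  induction l with
  | nil => simp [split1]
  | cons c rest ih =>
    unfold split1
    split_ifs with hc
    · intro p hp
      rcases List.mem_cons.mp hp with h | h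
      · simp [h]
      · exact ih p h
    · obtain ⟨q, qs, hs⟩ := split1_cons rest
      rw [hs]
      intro p hp
      rcases List.mem_cons.mp hp with h | h
      · subst h
        intro hmem
        rcases List.mem_cons.mp hmem with h | h
        · exact hc h.symm
        · exact ih q (by rw [hs]; exact List.mem_cons_self) h
      · exact ih p (by rw [hs]; exact List.mem_cons_of_mem _ h)

theorem split1_join :
    ∀ (l : List Char) (f : List Char) (rest : List (List Char)),
      split1 l = f :: rest → l = f ++ rest.flatMap (fun g => ',' :: g) := by
  intro l
  induction l with
  | nil =>
    intro f rest h
    simp [split1] at h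
    rw [h.1, h.2]
    simp
  | cons c t ih =>
    intro f rest h
    unfold split1 at h
    split_ifs at h with hc
    · obtain ⟨q, qs, hs⟩ := split1_cons t
      rw [hs] at h
      injection h with h1 h2
      subst h1
      have := ih q qs hs
      subst h2
      simp [hc, this]
    · obtain ⟨q, qs, hs⟩ := split1_cons t
      rw [hs] at h
      injection h with h1 h2
      have := ih q qs hs
      subst h1 h2
      simp [this]

-- A's scan over a comma-free fragment: append it to curr, add its brace delta
theorem foldA_frag (f : List Char) (hf : ',' ∉ f) :
    ∀ (stack : List (List Char)) (curr : List Char) (bc : Int),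
      List.foldl convertStepA (stack, curr, bc) f
        = (stack, curr ++ f, bc + (f.count '{' : Int) - (f.count '}' : Int)) := by
  induction f with
  | nil => intro stack curr bc; simp
  | cons a t ih =>
    intro stack curr bc
    have ha : a ≠ ',' := by intro h; exact hf (by simp [h])
    have ht : ',' ∉ t := fun h => hf (List.mem_cons_of_mem _ h)
    simp only [List.foldl_cons]
    have hstep : convertStepA (stack, curr, bc) a
        = (stack, curr ++ [a],
            bc + (if a = '{' then 1 else 0) - (if a = '}' then 1 else 0)) := by
      unfold convertStepA
      rw [if_neg (by intro hh; exact ha hh.1)]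
      split_ifs with h1 h2 <;> simp_all
    rw [hstep, ih ht]
    simp only [Prod.mk.injEq]
    refine ⟨by trivial, by simp, ?_⟩
    simp only [List.count_cons]
    split_ifs with h1 h2 <;> simp_all [beq_iff_eq] <;> omega

-- finishers and the post-fragment state
def finA (st : List (List Char) × List Char × Int) : List (List Char) :=
  if st.2.1 ≠ [] then st.1 ++ [st.2.1] else st.1

def finB (st : List (List Char) × Option (List Char) × Int) : List (List Char) :=
  match st.2.1 with
  | none => st.1
  | some b => if b ≠ [] then st.1 ++ [b] else st.1

def cflush (stack : List (List Char)) (curr : List Char) (bc : Int) :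
    List (List Char) × Option (List Char) × Int :=
  if bc = 0 then (if curr ≠ [] then stack ++ [curr] else stack, none, bc)
  else (stack, some curr, bc)

theorem stepB_none (stack : List (List Char)) (bc : Int) (f : List Char) :
    convertStepB (stack, none, bc) f
      = cflush stack f (bc + (f.count '{' : Int) - (f.count '}' : Int)) := by
  unfold convertStepB cflush
  simp [count_single]

theorem stepB_some (stack : List (List Char)) (curr : List Char) (bc : Int) (f : List Char) :
    convertStepB (stack, some curr, bc) f
      = cflush stack (curr ++ ',' :: f) (bc + (f.count '{' : Int) - (f.count '}' : Int)) := by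
  unfold convertStepB cflush
  simp [count_single]

-- the heart: A's char scan of ",f1,f2,…" agrees with B's fragment fold
theorem main_aux :
    ∀ (rest : List (List Char)), (∀ f ∈ rest, ',' ∉ f) →
      ∀ (stack : List (List Char)) (curr : List Char) (bc : Int),
        finA (List.foldl convertStepA (stack, curr, bc) (rest.flatMap (fun g => ',' :: g)))
          = finB (List.foldl convertStepB (cflush stack curr bc) rest) := by
  intro rest
  induction rest with
  | nil =>
    intro _ stack curr bc
    simp only [List.flatMap_nil, List.foldl_nil]
    unfold cflush
    by_cases hbc : bc = 0
    · rw [if_pos hbc]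
      unfold finA finB
      simp
    · rw [if_neg hbc]
      unfold finA finB
      simp
  | cons f rs ih =>
    intro hnc stack curr bc
    have hf : ',' ∉ f := hnc f List.mem_cons_self
    have hrs : ∀ g ∈ rs, ',' ∉ g := fun g hg => hnc g (List.mem_cons_of_mem _ hg)
    have hcomma : convertStepA (stack, curr, bc) ','
        = if bc = 0 then (if curr ≠ [] then stack ++ [curr] else stack, ([] : List Char), bc)
          else (stack, curr ++ [','], bc) := by
      unfold convertStepA
      have h1 : ¬ ((',' : Char) = '{') := by decide
      have h2 : ¬ ((',' : Char) = '}') := by decide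
      simp [h1, h2]
    simp only [List.flatMap_cons, List.cons_append, List.foldl_cons, List.foldl_append, hcomma]
    by_cases hbc : bc = 0
    · subst hbc
      rw [if_pos rfl]
      rw [foldA_frag f hf]
      have heq : cflush stack curr 0
          = ((if curr ≠ [] then stack ++ [curr] else stack), none, (0 : Int)) := by
        unfold cflush
        rw [if_pos rfl]
      rw [heq, stepB_none]
      have := ih hrs (if curr ≠ [] then stack ++ [curr] else stack) ([] ++ f)
        ((0 : Int) + (f.count '{' : Int) - (f.count '}' : Int))
      simpa using this
    · rw [if_neg hbc]
      rw [foldA_frag f hf]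
      have heq : cflush stack curr bc = (stack, some curr, bc) := by
        unfold cflush
        rw [if_neg hbc]
      rw [heq, stepB_some]
      have := ih hrs stack ((curr ++ [',']) ++ f)
        (bc + (f.count '{' : Int) - (f.count '}' : Int))
      simpa using this

-- ===== VERDICT (by name: the statement is the Claim_ definition above) =====
set_option maxHeartbeats 1000000 in
theorem convert_to_list_spec : Claim_equal_convert_to_list := by
  intro s _
  unfold Spec_convert_to_list
  have hA : convert_to_list s
      = remove_duplicates
          ((finA (List.foldl convertStepA ([], [], 0) (convertPre s))).map String.ofList) := rfl
  have hB : convert_to_list_alt s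
      = PySem.List.dedup
          ((finB (List.foldl convertStepB ([], none, 0)
              (PySem.Chars.splitOn (convertPre s) [',']))).map String.ofList) := rfl
  rw [hA, hB, rd_eq_dedup, splitOn_comma]
  obtain ⟨f, rest, hs⟩ := split1_cons (convertPre s)
  have hjoin := split1_join (convertPre s) f rest hs
  have hone : ',' ∉ f := split1_no_comma (convertPre s) f (by rw [hs]; exact List.mem_cons_self)
  have hrest : ∀ g ∈ rest, ',' ∉ g := fun g hg =>
    split1_no_comma (convertPre s) g (by rw [hs]; exact List.mem_cons_of_mem _ hg)
  rw [hs]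
  have hmain : finA (List.foldl convertStepA ([], [], 0) (convertPre s))
      = finB (List.foldl convertStepB ([], none, 0) (f :: rest)) := by
    conv_lhs => rw [hjoin]
    rw [List.foldl_append, foldA_frag f hone]
    simp only [List.foldl_cons]
    rw [stepB_none]
    have := main_aux rest hrest [] (([] : List Char) ++ f)
        ((0 : Int) + (f.count '{' : Int) - (f.count '}' : Int))
    simpa using this
  rw [hmain]
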